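-- pv_equiv track=rewrite | github.com/YashDaga874/yoga-therapy | utils/disease_combinations.py | generate_disease_combinations
-- ===== SOURCE A (Python) =====
-- from itertools import combinations
-- from typing import List, Set, Dict, FrozenSet
--
-- def generate_disease_combinations(disease_names: List[str]) -> Dict[int, List[FrozenSet[str]]]:
--     """
--     Generate all possible combinations of diseases.
--
--     Args:
--         disease_names: List of disease names (e.g., ['Depression', 'GAD', 'ADHD', 'Insomnia'])
--
--     Returns:
--         Dictionary mapping combination size to list of frozen sets
--         {
--             1: [frozenset(['Depression']), frozenset(['GAD']), ...],
--             2: [frozenset(['Depression', 'GAD']), frozenset(['Depression', 'ADHD']), ...],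
--             3: [frozenset(['Depression', 'GAD', 'ADHD']), ...],
--             4: [frozenset(['Depression', 'GAD', 'ADHD', 'Insomnia'])]
--         }
--     """
--     combinations_dict = {}
--
--     # Generate combinations of size 1 to len(disease_names)
--     for r in range(1, len(disease_names) + 1):
--         combo_list = []
--         for combo in combinations(disease_names, r):
--             combo_list.append(frozenset(combo))
--         combinations_dict[r] = combo_list
--
--     return combinations_dict
-- ===== SOURCE B (Python) =====
-- def _combos(names, start, r):
--     """All r-element combinations of names[start:] as lists, in
--     itertools-style lexicographic index order, built recursively."""
--     if r == 0:
--         return [[]]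
--     out = []
--     for i in range(start, len(names) - r + 1):
--         for rest in _combos(names, i + 1, r - 1):
--             out.append([names[i]] + rest)
--     return out
--
-- def generate_disease_combinations(disease_names):
--     result = {}
--     for r in range(1, len(disease_names) + 1):
--         result[r] = [frozenset(c) for c in _combos(disease_names, 0, r)]
--     return result
-- ===== Notes on version B (the rewrite author's own statement) =====
-- stated objective: alternative
-- what changed: Replaces the per-size itertools.combinations library calls with a hand-written recursive generator over a start index that picks names[i] and recurses with (i+1, r-1), reproducing the same lexicographic order.
import Mathlib
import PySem

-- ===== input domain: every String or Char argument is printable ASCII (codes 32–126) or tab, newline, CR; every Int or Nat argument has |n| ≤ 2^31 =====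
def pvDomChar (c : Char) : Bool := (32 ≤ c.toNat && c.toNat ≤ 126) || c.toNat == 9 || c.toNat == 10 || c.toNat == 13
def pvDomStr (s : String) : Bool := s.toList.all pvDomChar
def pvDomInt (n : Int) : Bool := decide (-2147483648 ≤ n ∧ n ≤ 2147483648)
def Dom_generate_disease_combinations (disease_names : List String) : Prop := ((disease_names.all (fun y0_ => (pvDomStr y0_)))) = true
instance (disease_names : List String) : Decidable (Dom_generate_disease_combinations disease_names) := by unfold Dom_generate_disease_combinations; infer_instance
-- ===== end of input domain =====

-- B replaces itertools.combinations with a hand-written start-index recursion (same order, same cost).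

-- ===== PORT A =====
-- itertools.combinations(xs, r) in lexicographic index order (library call, ported as the canonical recursion)
def pyCombinations : List String → Nat → List (List String)
  | _, 0 => [[]]
  | [], _ + 1 => []
  | x :: xs, r + 1 => (pyCombinations xs r).map (fun c => x :: c) ++ pyCombinations xs (r + 1)

def generate_disease_combinations (disease_names : List String) : List (Int × List (List String)) :=
  ((PySem.List.pyRange 1 ((disease_names.length : Int) + 1) 1).foldl
    (fun d r =>
      PySem.Dict.insert d r
        ((pyCombinations disease_names r.toNat).foldl
          (fun combo_list combo => combo_list ++ [PySem.Set.ofList combo]) []))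
    PySem.Dict.empty).items

-- ===== PORT B =====
-- _combos(names, start, r): for i in range(start, len(names)-r+1) pick names[i], recurse (i+1, r-1).
-- range(start, len-(r+1)+1) has (len - r) - start elements (Nat subtraction matches Python's empty
-- range when the stop is ≤ start); names[i] is in range here, ported as getD.
def pvCombosB (names : List String) : Nat → Nat → List (List String)
  | _, 0 => [[]]
  | start, r + 1 =>
    (List.range' start (names.length - r - start)).foldl
      (fun out i => out ++ (pvCombosB names (i + 1) r).map (fun rest => names.getD i "" :: rest)) []
  termination_by _ r => r

def generate_disease_combinations_alt (disease_names : List String) : List (Int × List (List String)) :=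
  ((PySem.List.pyRange 1 ((disease_names.length : Int) + 1) 1).foldl
    (fun d r =>
      PySem.Dict.insert d r ((pvCombosB disease_names 0 r.toNat).map (fun c => PySem.Set.ofList c)))
    PySem.Dict.empty).items

-- ===== PRECONDITION & SPEC =====
def Spec_generate_disease_combinations (disease_names : List String) (out : List (Int × List (List String))) : Prop := out = generate_disease_combinations_alt disease_names
instance (disease_names : List String) (out : List (Int × List (List String))) : Decidable (Spec_generate_disease_combinations disease_names out) := by unfold Spec_generate_disease_combinations; infer_instance

-- ===== CLAIM (what is proved, stated in full; the proofs are below) =====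
def Claim_equal_generate_disease_combinations : Prop := ∀ (disease_names : List String), Dom_generate_disease_combinations disease_names → Spec_generate_disease_combinations disease_names (generate_disease_combinations disease_names)

-- ===== LEMMAS AND PROOFS =====

theorem pyCombinations_of_lt {xs : List String} {r : Nat} (h : xs.length < r + 1) :
    pyCombinations xs (r + 1) = [] := by
  induction xs generalizing r with
  | nil => rfl
  | cons x xs ih =>
    simp only [List.length_cons] at h
    cases r with
    | zero => omega
    | succ r =>
      simp only [pyCombinations]
      rw [ih (by omega), ih (by omega)]
      rfl

theorem pvCombosB_flatMap (names : List String) (start r : Nat) :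
    pvCombosB names start (r + 1) =
      (List.range' start (names.length - r - start)).flatMap
        (fun i => (pvCombosB names (i + 1) r).map (fun rest => names.getD i "" :: rest)) := by
  rw [pvCombosB, PySem.List.foldl_append_eq_flatMap]
  rfl

theorem pvCombosB_eq_pyCombinations (names : List String) :
    ∀ (r start : Nat), pvCombosB names start r = pyCombinations (names.drop start) r := by
  intro r
  induction r with
  | zero =>
    intro start
    cases h : names.drop start <;> simp [pvCombosB, pyCombinations]
  | succ r ih =>
    -- inner descending induction on names.length - start, via fuel
    suffices H : ∀ (d start : Nat), names.length - start ≤ d →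
        pvCombosB names start (r + 1) = pyCombinations (names.drop start) (r + 1) by
      intro start; exact H (names.length - start) start le_rfl
    intro d
    induction d with
    | zero =>
      intro start hd
      rw [pvCombosB_flatMap]
      have h0 : names.length - r - start = 0 := by omega
      rw [h0]
      have hlen : (names.drop start).length < r + 1 := by
        simp only [List.length_drop]; omega
      rw [pyCombinations_of_lt hlen]
      rfl
    | succ d ihd =>
      intro start hd
      rw [pvCombosB_flatMap]
      by_cases hc : names.length - r - start = 0
      · rw [hc]
        have hlen : (names.drop start).length < r + 1 := by
          simp only [List.length_drop]; omega
        rw [pyCombinations_of_lt hlen]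
        rfl
      · obtain ⟨c, hc'⟩ : ∃ c, names.length - r - start = c + 1 :=
          ⟨names.length - r - start - 1, by omega⟩
        have hstart : start < names.length := by omega
        rw [hc', List.range'_succ, List.flatMap_cons]
        have hdrop : names.drop start = names[start] :: names.drop (start + 1) :=
          (List.getElem_cons_drop hstart).symm
        rw [hdrop]
        simp only [pyCombinations]
        congr 1
        · rw [ih (start + 1)]
          simp only [show names.getD start "" = names[start] from
            List.getD_eq_getElem names "" hstart]
        · have hc2 : names.length - r - (start + 1) = c := by omega
          rw [← hc2, ← pvCombosB_flatMap names (start + 1) r, ihd (start + 1) (by omega)]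

theorem inner_lists_eq (names : List String) (n : Nat) :
    (pyCombinations names n).foldl (fun combo_list combo => combo_list ++ [PySem.Set.ofList combo]) []
      = (pvCombosB names 0 n).map (fun c => PySem.Set.ofList c) := by
  rw [PySem.List.foldl_append_singleton_eq_map, pvCombosB_eq_pyCombinations names n 0]
  simp

-- ===== VERDICT (by name: the statement is the Claim_ definition above) =====
theorem generate_disease_combinations_spec : Claim_equal_generate_disease_combinations := by
  intro names _
  show generate_disease_combinations names = generate_disease_combinations_alt names
  unfold generate_disease_combinations generate_disease_combinations_alt
  congr 1
  congr 1
  funext d r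
  rw [inner_lists_eq]
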